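-- pv_equiv track=rewrite | github.com/jcraig949jfi/Prometheus | prometheus_math/lehmer_brute_force.py | total_shards
-- ===== SOURCE A (Python) =====
-- DEFAULT_COEF_RANGE: tuple[int, int] = (-5, 5)
--
-- def total_shards(
--     coef_range: tuple[int, int] = DEFAULT_COEF_RANGE,
--     c0_positive_only: bool = True,
-- ) -> int:
--     """Number of shards for the (c_0, c_1) sharding."""
--     lo, hi = int(coef_range[0]), int(coef_range[1])
--     inner_count = hi - lo + 1
--     if c0_positive_only:
--         c0_count = sum(1 for c in range(lo, hi + 1) if c > 0)
--     else:
--         c0_count = sum(1 for c in range(lo, hi + 1) if c != 0)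
--     return c0_count * inner_count
-- ===== SOURCE B (Python) =====
-- DEFAULT_COEF_RANGE: tuple[int, int] = (-5, 5)
--
-- def total_shards(
--     coef_range: tuple[int, int] = DEFAULT_COEF_RANGE,
--     c0_positive_only: bool = True,
-- ) -> int:
--     """Number of shards for the (c_0, c_1) sharding, by closed-form arithmetic."""
--     lo, hi = int(coef_range[0]), int(coef_range[1])
--     if c0_positive_only:
--         c0_count = max(0, hi - max(lo, 1) + 1)
--     else:
--         c0_count = max(0, hi - lo + 1) - (1 if lo <= 0 <= hi else 0)
--     return c0_count * (hi - lo + 1)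
-- ===== Notes on version B (the rewrite author's own statement) =====
-- stated objective: faster
-- what changed: Replaced both O(n) counting loops over range(lo, hi+1) with closed-form arithmetic (clamped interval-length formulas), keeping the unclamped hi-lo+1 multiplier.
import Mathlib
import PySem

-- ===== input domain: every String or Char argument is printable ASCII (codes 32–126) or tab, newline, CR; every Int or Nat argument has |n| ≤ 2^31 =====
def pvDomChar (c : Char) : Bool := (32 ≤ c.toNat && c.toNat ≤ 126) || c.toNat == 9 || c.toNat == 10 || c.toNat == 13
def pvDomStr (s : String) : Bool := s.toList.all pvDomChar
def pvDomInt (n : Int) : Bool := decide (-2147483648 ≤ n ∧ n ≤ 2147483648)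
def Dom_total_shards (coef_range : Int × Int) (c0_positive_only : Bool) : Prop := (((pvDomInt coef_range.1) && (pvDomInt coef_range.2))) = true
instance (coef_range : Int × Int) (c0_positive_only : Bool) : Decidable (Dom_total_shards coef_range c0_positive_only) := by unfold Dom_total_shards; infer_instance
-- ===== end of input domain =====

-- B replaces A's two counting loops over range(lo, hi+1) with closed-form clamped arithmetic (objective: faster, O(1) vs O(hi-lo)).

-- ===== PORT A =====
def total_shards (coef_range : Int × Int) (c0_positive_only : Bool) : Int :=
  let lo := coef_range.1
  let hi := coef_range.2
  let inner_count := hi - lo + 1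
  let c0_count : Int :=
    if c0_positive_only then
      (PySem.List.pyRange lo (hi + 1) 1).foldl (fun acc c => if 0 < c then acc + 1 else acc) 0
    else
      (PySem.List.pyRange lo (hi + 1) 1).foldl (fun acc c => if c ≠ 0 then acc + 1 else acc) 0
  c0_count * inner_count

-- ===== PORT B =====
def total_shards_alt (coef_range : Int × Int) (c0_positive_only : Bool) : Int :=
  let lo := coef_range.1
  let hi := coef_range.2
  let c0_count : Int :=
    if c0_positive_only then
      max 0 (hi - max lo 1 + 1)
    else
      max 0 (hi - lo + 1) - (if lo ≤ 0 ∧ 0 ≤ hi then 1 else 0)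
  c0_count * (hi - lo + 1)

-- ===== PRECONDITION & SPEC =====
def Spec_total_shards (coef_range : Int × Int) (c0_positive_only : Bool) (out : Int) : Prop := out = total_shards_alt coef_range c0_positive_only
instance (coef_range : Int × Int) (c0_positive_only : Bool) (out : Int) : Decidable (Spec_total_shards coef_range c0_positive_only out) := by unfold Spec_total_shards; infer_instance

-- ===== CLAIM (what is proved, stated in full; the proofs are below) =====
def Claim_equal_total_shards : Prop := ∀ (coef_range : Int × Int) (c0_positive_only : Bool), Dom_total_shards coef_range c0_positive_only → Spec_total_shards coef_range c0_positive_only (total_shards coef_range c0_positive_only)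

-- ===== LEMMAS AND PROOFS =====

theorem fold_pos_count (n : Nat) : ∀ lo : Int,
    (PySem.List.pyRange lo (lo + n) 1).foldl (fun acc c => if 0 < c then acc + 1 else acc) 0
      = max 0 (lo + n - max lo 1) := by
  induction n with
  | zero =>
    intro lo
    rw [show lo + (0:Nat) = lo by simp, PySem.List.pyRange_one_eq_nil le_rfl]
    simp
  | succ m ih =>
    intro lo
    have h1 : lo + ((m : Nat) + 1 : Nat) = (lo + m) + 1 := by push_cast; ring
    rw [h1, PySem.List.pyRange_one_succ_right (by omega), List.foldl_append]
    simp only [List.foldl]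
    rw [ih lo]
    split_ifs <;> omega

theorem fold_ne_count (n : Nat) : ∀ lo : Int,
    (PySem.List.pyRange lo (lo + n) 1).foldl (fun acc c => if c ≠ 0 then acc + 1 else acc) 0
      = (n : Int) - (if lo ≤ 0 ∧ 0 < lo + n then 1 else 0) := by
  induction n with
  | zero =>
    intro lo
    rw [show lo + (0:Nat) = lo by simp, PySem.List.pyRange_one_eq_nil le_rfl]
    simp
  | succ m ih =>
    intro lo
    have h1 : lo + ((m : Nat) + 1 : Nat) = (lo + m) + 1 := by push_cast; ring
    rw [h1, PySem.List.pyRange_one_succ_right (by omega), List.foldl_append]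
    simp only [List.foldl]
    rw [ih lo]
    split_ifs <;> push_cast <;> omega

-- ===== VERDICT (by name: the statement is the Claim_ definition above) =====
theorem total_shards_spec : Claim_equal_total_shards := by
  intro ⟨lo, hi⟩ b _
  unfold Spec_total_shards total_shards total_shards_alt
  simp only
  by_cases hle : lo ≤ hi
  · have hn : hi + 1 = lo + ((hi + 1 - lo).toNat : Int) := by omega
    rw [hn, fold_pos_count, fold_ne_count]
    cases b <;> simp only [if_true, if_false, Bool.false_eq_true]
    · congr 1
      split_ifs <;> omega
    · congr 1
      omega
  · rw [PySem.List.pyRange_one_eq_nil (by omega)]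
    cases b <;> simp only [List.foldl_nil, if_true]
    · congr 1
      split_ifs <;> omega
    · congr 1
      omega
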